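-- pv_equiv track=rewrite | github.com/tamuzGitler/LeetCode-Practice | groupThePeople.py | groupThePeople2
-- ===== SOURCE A (Python) =====
-- def groupThePeople2(groupSizes):
--     """
--     :type groupSizes: List[int]
--     :rtype: List[List[int]]
--     """
--     indexs = list(range(0, len(groupSizes)))
--     indexGroupSize = list(zip(groupSizes, indexs))
--     indexGroupSize.sort()
--     groups = []
--     curGroup = []
--     for demand in indexGroupSize:
--         curGroup.append(demand[1])
--         if len(curGroup) == demand[0]:
--             groups.append(curGroup)
--             curGroup = []
--
--     return groups
-- ===== SOURCE B (Python) =====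
-- def groupThePeople2(groupSizes):
--     buckets = {}
--     for i, s in enumerate(groupSizes):
--         buckets.setdefault(s, []).append(i)
--     groups = []
--     cur = []
--     for s in sorted(buckets):
--         for i in buckets[s]:
--             cur.append(i)
--             if len(cur) == s:
--                 groups.append(cur)
--                 cur = []
--     return groups
-- ===== Notes on version B (the rewrite author's own statement) =====
-- stated objective: alternative
-- what changed: Replaces A's sort of all n (size, index) pairs by a single dict pass bucketing indices by size plus a sort of only the distinct sizes, then emits groups by walking the buckets in sorted-size order.
import Mathlib
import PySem

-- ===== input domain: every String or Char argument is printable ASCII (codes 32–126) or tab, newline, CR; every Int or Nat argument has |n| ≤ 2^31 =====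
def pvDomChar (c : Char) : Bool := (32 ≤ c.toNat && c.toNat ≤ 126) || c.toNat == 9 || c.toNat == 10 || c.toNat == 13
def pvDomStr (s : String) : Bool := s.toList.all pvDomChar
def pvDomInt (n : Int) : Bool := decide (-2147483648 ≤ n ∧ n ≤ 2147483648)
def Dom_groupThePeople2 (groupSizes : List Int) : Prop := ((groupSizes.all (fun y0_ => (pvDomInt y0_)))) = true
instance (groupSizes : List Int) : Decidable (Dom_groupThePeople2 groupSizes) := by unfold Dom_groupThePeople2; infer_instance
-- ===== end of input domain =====

-- B replaces A's sort of all (size, index) pairs by one dict-bucketing pass over the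
-- indices plus a sort of only the distinct sizes (objective: alternative algorithm).

-- ===== PORT A =====
-- literal transliteration of Source A: sort the zipped (size, index) pairs, then one greedy scan
def groupThePeople2 (groupSizes : List Int) : List (List Int) :=
  let indexs := PySem.List.pyRange 0 (groupSizes.length : Int) 1
  let indexGroupSize := groupSizes.zip indexs
  let sortedPairs := PySem.List.sorted2 indexGroupSize (fun p => p.1) (fun p => p.2) false
  let res := sortedPairs.foldl
    (fun st demand =>
      let curGroup := st.2 ++ [demand.2]
      if (curGroup.length : Int) = demand.1 then (st.1 ++ [curGroup], ([] : List Int))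
      else (st.1, curGroup))
    ([], [])
  res.1

-- ===== PORT B =====
-- literal transliteration of Source B: bucket indices by size in a dict, then walk the sizes
-- in sorted order, chunking each bucket greedily (cur is threaded through, as in Source B)
def groupThePeople2_alt (groupSizes : List Int) : List (List Int) :=
  let buckets := (PySem.List.enumerate groupSizes 0).foldl
    (fun d p => d.modify p.2 [] (fun l => l ++ [p.1])) PySem.Dict.empty
  let res := (PySem.List.sorted buckets.keys (fun x => x) false).foldl
    (fun st s => (buckets.getD s []).foldl
      (fun st i =>
        let cur := st.2 ++ [i]
        if (cur.length : Int) = s then (st.1 ++ [cur], ([] : List Int)) else (st.1, cur))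
      st)
    ([], [])
  res.1

-- ===== PRECONDITION & SPEC =====
def Spec_groupThePeople2 (groupSizes : List Int) (out : List (List Int)) : Prop := out = groupThePeople2_alt groupSizes
instance (groupSizes : List Int) (out : List (List Int)) : Decidable (Spec_groupThePeople2 groupSizes out) := by unfold Spec_groupThePeople2; infer_instance

-- ===== CLAIM (what is proved, stated in full; the proofs are below) =====
def Claim_equal_groupThePeople2 : Prop := ∀ (groupSizes : List Int), Dom_groupThePeople2 groupSizes → Spec_groupThePeople2 groupSizes (groupThePeople2 groupSizes)

-- ===== LEMMAS AND PROOFS =====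

-- the zipped (size, index) list of A is the swapped enumerate list of B
theorem pv_zip_eq_enum_swap (xs : List Int) (s : Int) :
    xs.zip (PySem.List.pyRange s (s + (xs.length : Int)) 1)
      = (PySem.List.enumerate xs s).map (fun p => (p.2, p.1)) := by
  induction xs generalizing s with
  | nil => simp [PySem.List.enumerate]
  | cons x xs ih =>
      rw [PySem.List.pyRange_one_cons (by simp only [List.length_cons]; push_cast; omega)]
      simp only [PySem.List.enumerate_cons, List.map_cons, List.zip_cons_cons]
      have h : s + ((x :: xs).length : Int) = (s + 1) + (xs.length : Int) := by
        simp only [List.length_cons]; push_cast; ring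
      rw [h, ih (s + 1)]

-- Python's tuple sort of (Int × Int) pairs is a sort by the lexicographic key
theorem pv_sorted2_eq_sorted_lex (xs : List (Int × Int)) :
    PySem.List.sorted2 xs (fun p => p.1) (fun p => p.2) false
      = PySem.List.sorted xs (fun p => toLex p) false := by
  show List.foldl _ [] xs = List.foldl _ [] xs
  congr 1
  funext acc x
  congr 1
  funext a b
  have : (toLex a < toLex b) ↔ (a.1 < b.1 ∨ a.1 = b.1 ∧ a.2 < b.2) := Prod.Lex.lt_iff
  by_cases h1 : a.1 < b.1 <;> by_cases h2 : b.1 < a.1 <;> by_cases h3 : a.2 < b.2 <;>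
    simp [h1, h2, h3, this] <;> omega

-- concatenating the per-key filters over a nodup key list covering all keys is a permutation
theorem pv_flatMap_filter_perm (ks : List Int) (l : List (Int × Int))
    (hnd : ks.Nodup) (hall : ∀ p ∈ l, p.1 ∈ ks) :
    (ks.flatMap (fun s => l.filter (fun p => p.1 == s))).Perm l := by
  induction ks generalizing l with
  | nil =>
      have : l = [] := by
        cases l with
        | nil => rfl
        | cons p t => exact absurd (hall p (by simp)) (by simp)
      simp [this]
  | cons k ks ih =>
      rw [List.flatMap_cons]
      have hstep : ∀ s ∈ ks, l.filter (fun p => p.1 == s)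
          = (l.filter (fun p => !(p.1 == k))).filter (fun p => p.1 == s) := by
        intro s hs
        have hsk : s ≠ k := fun h => (List.nodup_cons.mp hnd).1 (h ▸ hs)
        rw [List.filter_filter]
        apply List.filter_congr
        intro p _
        by_cases hps : p.1 = s
        · simp [hps, hsk]
        · simp [hps]
      rw [List.flatMap_congr hstep]
      have ih' := ih (l.filter (fun p => !(p.1 == k)))
        (List.nodup_cons.mp hnd).2
        (by
          intro p hp
          have hmem := List.mem_of_mem_filter hp
          have hne : ¬ (p.1 == k) = true := by
            have := List.of_mem_filter hp; simpa using this
          have := hall p hmem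
          simp at hne
          simpa [hne] using this)
      exact (ih'.append_left _).trans (List.filter_append_perm (fun p => p.1 == k) l)

-- the bucket stream is strictly increasing in the lexicographic order
theorem pv_stream_pairwise (ks : List Int) (l : List (Int × Int))
    (hks : ks.Pairwise (· < ·)) (hl : l.Pairwise (fun a b => a.2 < b.2)) :
    (ks.flatMap (fun s => l.filter (fun p => p.1 == s))).Pairwise
      (fun a b => toLex a < toLex b) := by
  rw [List.pairwise_flatMap]
  constructor
  · intro s _
    refine (hl.filter (fun p => p.1 == s)).imp_of_mem ?_
    intro a b ha hb hab
    have ha1 : a.1 = s := by simpa using List.of_mem_filter ha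
    have hb1 : b.1 = s := by simpa using List.of_mem_filter hb
    rw [Prod.Lex.lt_iff]
    exact Or.inr ⟨by simp [ha1, hb1], hab⟩
  · refine hks.imp ?_
    intro s t hst x hx y hy
    have hx1 : x.1 = s := by simpa using List.of_mem_filter hx
    have hy1 : y.1 = t := by simpa using List.of_mem_filter hy
    rw [Prod.Lex.lt_iff]
    exact Or.inl (by simp [hx1, hy1]; exact hst)

-- the whole equivalence, as a plain equation
theorem pv_main (groupSizes : List Int) :
    groupThePeople2 groupSizes = groupThePeople2_alt groupSizes := by
  unfold groupThePeople2 groupThePeople2_alt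
  -- shared abbreviations
  have hl : groupSizes.zip (PySem.List.pyRange 0 (groupSizes.length : Int) 1)
      = (PySem.List.enumerate groupSizes 0).map (fun p => (p.2, p.1)) := by
    simpa using pv_zip_eq_enum_swap groupSizes 0
  set l := (PySem.List.enumerate groupSizes 0).map (fun p => (p.2, p.1)) with hldef
  set step := fun (st : List (List Int) × List Int) (demand : Int × Int) =>
      let curGroup := st.2 ++ [demand.2]
      if (curGroup.length : Int) = demand.1 then (st.1 ++ [curGroup], ([] : List Int))
      else (st.1, curGroup) with hstep
  -- B's dict, re-expressed as a fold over l
  have hb : (PySem.List.enumerate groupSizes 0).foldl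
        (fun d p => d.modify p.2 [] (fun v => v ++ [p.1])) PySem.Dict.empty
      = l.foldl (fun d p => d.modify p.1 [] (fun v => v ++ [p.2])) PySem.Dict.empty := by
    rw [hldef, List.foldl_map]
  have hmapfst : l.map (fun p => p.1) = groupSizes := by
    rw [hldef, List.map_map]
    exact PySem.List.map_snd_enumerate groupSizes 0
  have hkeys : (l.foldl (fun d p => d.modify p.1 [] (fun v => v ++ [p.2]))
        PySem.Dict.empty).keys = PySem.Set.ofList groupSizes := by
    rw [PySem.Dict.keys_foldl_modify_key l (fun p => p.1) [] (fun _ p => fun v => v ++ [p.2])]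
    rw [hmapfst]
    simp [PySem.Set.update, PySem.Set.ofList_eq_foldl, PySem.Dict.keys, PySem.Dict.empty]
  have hgetD : ∀ s : Int, (l.foldl (fun d p => d.modify p.1 [] (fun v => v ++ [p.2]))
        PySem.Dict.empty).getD s []
      = (l.filter (fun p => p.1 == s)).map (fun p => p.2) := by
    intro s
    rw [PySem.Dict.getD_foldl_modify_append l PySem.Dict.empty s]
    simp
  set ks := PySem.List.sorted (PySem.Set.ofList groupSizes) (fun x => x) false with hksdef
  have hknd : ks.Nodup :=
    ((PySem.List.sorted_perm (PySem.Set.ofList groupSizes) (fun x => x) false).nodup_iff).mpr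
      (PySem.Set.nodup_ofList groupSizes)
  have hkpw : ks.Pairwise (· < ·) := PySem.List.sorted_ofList_pairwise_lt groupSizes
  have hall : ∀ p ∈ l, p.1 ∈ ks := by
    intro p hp
    rw [hksdef, PySem.List.mem_sorted, PySem.Set.mem_ofList]
    rw [hldef] at hp
    obtain ⟨q, hq, rfl⟩ := List.mem_map.mp hp
    obtain ⟨k, hk, rfl⟩ := (PySem.List.mem_enumerate_iff groupSizes 0 q).mp hq
    exact List.getElem_mem hk
  have hlpw : l.Pairwise (fun a b => a.2 < b.2) := by
    rw [hldef, List.pairwise_map]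
    exact PySem.List.pairwise_lt_enumerate groupSizes 0
  -- the sorted pair list of A equals the bucket stream of B
  have hstream : PySem.List.sorted2 l (fun p => p.1) (fun p => p.2) false
      = ks.flatMap (fun s => l.filter (fun p => p.1 == s)) := by
    rw [pv_sorted2_eq_sorted_lex]
    exact PySem.List.sorted_eq_of_perm_of_pairwise_lt l
      (ks.flatMap (fun s => l.filter (fun p => p.1 == s))) (fun p => toLex p)
      (pv_flatMap_filter_perm ks l hknd hall)
      (pv_stream_pairwise ks l hkpw hlpw)
  show (List.foldl step ([], [])
      (PySem.List.sorted2 (groupSizes.zip (PySem.List.pyRange 0 (groupSizes.length : Int) 1))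
        (fun p => p.1) (fun p => p.2) false)).1
    = (List.foldl
        (fun st s => List.foldl
            (fun (st : List (List Int) × List Int) i =>
              let cur := st.2 ++ [i];
              if (cur.length : Int) = s then (st.1 ++ [cur], ([] : List Int)) else (st.1, cur))
            st (((PySem.List.enumerate groupSizes 0).foldl
                  (fun d p => d.modify p.2 [] (fun v => v ++ [p.1])) PySem.Dict.empty).getD s []))
        ([], [])
        (PySem.List.sorted ((PySem.List.enumerate groupSizes 0).foldl
            (fun d p => d.modify p.2 [] (fun v => v ++ [p.1])) PySem.Dict.empty).keys
          (fun x => x) false)).1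
  rw [hl, hstream, hb, hkeys]
  rw [List.foldl_flatMap]
  congr 1
  apply PySem.List.foldl_congr_mem
  intro st s hs
  rw [hgetD s, List.foldl_map]
  apply PySem.List.foldl_congr_mem
  intro acc p hp
  have hp1 : p.1 = s := by simpa using List.of_mem_filter hp
  simp only [hstep]
  simp [hp1]

-- ===== VERDICT (by name: the statement is the Claim_ definition above) =====
theorem groupThePeople2_spec : Claim_equal_groupThePeople2 := by
  intro groupSizes _
  unfold Spec_groupThePeople2
  exact pv_main groupSizes
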